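-- pv_equiv track=rewrite | github.com/dcwatson/pyui | pyui/utils.py | enumerate_last
-- ===== SOURCE A (Python) =====
-- def enumerate_last(items):
--     iterator = iter(items)
--     try:
--         last_val = next(iterator)
--     except StopIteration:
--         return []
--     idx = -1
--     for idx, value in enumerate(iterator):
--         yield idx, last_val, False
--         last_val = value
--     yield idx + 1, last_val, True
-- ===== SOURCE B (Python) =====
-- def enumerate_last(items):
--     data = list(items)
--     n = len(data)
--     for i, value in enumerate(data):
--         yield i, value, i == n - 1
-- ===== Notes on version B (the rewrite author's own statement) =====
-- stated objective: simpler
-- what changed: Replaces the one-element lookahead buffer (next()/StopIteration, last_val/idx bookkeeping, trailing final yield) with materialising the input into a list and flagging i == len(data) - 1 directly; return value identical on all finite iterables, but B consumes the whole input upfront (not lazy on infinite iterators).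
import Mathlib
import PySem

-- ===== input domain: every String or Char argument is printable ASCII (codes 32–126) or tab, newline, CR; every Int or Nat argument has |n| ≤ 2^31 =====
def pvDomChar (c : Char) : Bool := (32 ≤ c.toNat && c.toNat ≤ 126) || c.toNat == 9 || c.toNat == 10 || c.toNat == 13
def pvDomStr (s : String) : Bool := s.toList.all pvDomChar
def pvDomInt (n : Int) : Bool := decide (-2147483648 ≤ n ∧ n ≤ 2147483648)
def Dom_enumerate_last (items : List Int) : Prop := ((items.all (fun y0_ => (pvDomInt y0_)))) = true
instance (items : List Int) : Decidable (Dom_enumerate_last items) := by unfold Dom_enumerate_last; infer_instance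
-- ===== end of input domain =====

-- B replaces A's one-element lookahead buffer (next/StopIteration, last_val/idx bookkeeping)
-- with a length-known pass flagging i == n - 1 (simpler); return value equal on all finite inputs,
-- but B consumes the whole input upfront, so laziness on infinite iterators is not preserved.

-- ===== PORT A =====
-- the 'for idx, value in enumerate(iterator)' loop: carries last_val and the previous index idx
def enumerate_last_loop (lastVal : Int) (idx : Int) : List Int → List (Int × Int × Bool)
  | [] => [(idx + 1, lastVal, true)]
  | v :: vs => (idx + 1, lastVal, false) :: enumerate_last_loop v (idx + 1) vs

def enumerate_last (items : List Int) : List (Int × Int × Bool) :=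
  match items with
  | [] => []                                  -- next(iterator) raised StopIteration
  | lastVal :: rest => enumerate_last_loop lastVal (-1) rest

-- ===== PORT B =====
def enumerate_last_alt (items : List Int) : List (Int × Int × Bool) :=
  let data := items
  let n : Int := data.length
  (PySem.List.enumerate data).map (fun p => (p.1, p.2, decide (p.1 = n - 1)))

-- ===== PRECONDITION & SPEC =====
def Spec_enumerate_last (items : List Int) (out : List (Int × Int × Bool)) : Prop := out = enumerate_last_alt items
instance (items : List Int) (out : List (Int × Int × Bool)) : Decidable (Spec_enumerate_last items out) := by unfold Spec_enumerate_last; infer_instance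

-- ===== CLAIM (what is proved, stated in full; the proofs are below) =====
def Claim_equal_enumerate_last : Prop := ∀ (items : List Int), Dom_enumerate_last items → Spec_enumerate_last items (enumerate_last items)

-- ===== LEMMAS AND PROOFS =====
lemma enumerate_last_loop_eq (t : List Int) : ∀ (lastVal k : Int),
    enumerate_last_loop lastVal k t =
      (PySem.List.enumerate (lastVal :: t) (k + 1)).map
        (fun p => (p.1, p.2, decide (p.1 = k + 1 + (t.length : Int)))) := by
  induction t with
  | nil =>
    intro lastVal k
    simp [enumerate_last_loop, PySem.List.enumerate_cons, PySem.List.enumerate_nil]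
  | cons v vs ih =>
    intro lastVal k
    have h1 : decide ((k + 1 : Int) = k + 1 + ((v :: vs).length : Int)) = false := by
      simp; push_cast; omega
    have h2 : (k + 1 + 1 + (vs.length : Int)) = k + 1 + ((v :: vs).length : Int) := by
      simp only [List.length_cons]; push_cast; omega
    simp only [enumerate_last_loop, PySem.List.enumerate_cons, List.map_cons, h1, ih v (k + 1), h2]

-- ===== VERDICT (by name: the statement is the Claim_ definition above) =====
theorem enumerate_last_spec : Claim_equal_enumerate_last := by
  intro items _
  unfold Spec_enumerate_last
  cases items with
  | nil => simp [enumerate_last, enumerate_last_alt, PySem.List.enumerate_nil]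
  | cons lastVal rest =>
    show enumerate_last_loop lastVal (-1) rest = _
    rw [enumerate_last_loop_eq]
    unfold enumerate_last_alt
    apply List.map_congr_left
    intro p _
    have h : ((-1 : Int) + 1 + (rest.length : Int)) = ((lastVal :: rest).length : Int) - 1 := by
      simp only [List.length_cons]; push_cast; omega
    rw [h]
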